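-- pv_equiv track=rewrite | github.com/uridolan77/socrates_ns | src/compliance/verification/violation_analyzer.py | _identify_bias_type
-- ===== SOURCE A (Python) =====
-- def _identify_bias_type(issue):
--     """Identify the type of bias from an issue"""
--     if not issue:
--         return "general_bias"
--
--     rule_id = issue.get("rule_id", "").lower()
--     description = issue.get("description", "").lower()
--
--     # Check for specific bias types
--     if any(term in rule_id or term in description for term in ["gender", "sexist", "sexism", "man", "woman", "male", "female"]):
--         return "gender_bias"
--     elif any(term in rule_id or term in description for term in ["race", "racial", "ethnic", "racism"]):
--         return "racial_bias"
--     elif any(term in rule_id or term in description for term in ["age", "ageism", "elderly", "young", "old"]):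
--         return "age_bias"
--     elif any(term in rule_id or term in description for term in ["disab", "handicap", "impair"]):
--         return "disability_bias"
--     elif any(term in rule_id or term in description for term in ["cultur", "religious", "nationality"]):
--         return "cultural_bias"
--     else:
--         return "general_bias"
-- ===== SOURCE B (Python) =====
-- _TERM_RANK = {
--     "gender": 0, "sexist": 0, "sexism": 0, "man": 0, "woman": 0, "male": 0, "female": 0,
--     "race": 1, "racial": 1, "ethnic": 1, "racism": 1,
--     "age": 2, "ageism": 2, "elderly": 2, "young": 2, "old": 2,
--     "disab": 3, "handicap": 3, "impair": 3,
--     "cultur": 4, "religious": 4, "nationality": 4,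
-- }
--
-- _NAMES = ["gender_bias", "racial_bias", "age_bias", "disability_bias",
--           "cultural_bias", "general_bias"]
--
--
-- def _identify_bias_type(issue):
--     """Identify the type of bias from an issue.
--
--     Flat term->priority-rank map: a single accumulator pass keeps the
--     minimum rank among all matching terms, then indexes the name table.
--     """
--     if not issue:
--         return "general_bias"
--
--     rule_id = issue.get("rule_id", "").lower()
--     description = issue.get("description", "").lower()
--
--     best = 5
--     for term, rank in _TERM_RANK.items():
--         if rank < best and (term in rule_id or term in description):
--             best = rank
--     return _NAMES[best]
-- ===== Notes on version B (the rewrite author's own statement) =====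
-- stated objective: alternative
-- what changed: Replaces the fixed if-elif chain of five any(...) branches with a single min-rank accumulator pass over a flat term-to-priority-rank map, with the final bias name looked up by rank in a name table.
import Mathlib
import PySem

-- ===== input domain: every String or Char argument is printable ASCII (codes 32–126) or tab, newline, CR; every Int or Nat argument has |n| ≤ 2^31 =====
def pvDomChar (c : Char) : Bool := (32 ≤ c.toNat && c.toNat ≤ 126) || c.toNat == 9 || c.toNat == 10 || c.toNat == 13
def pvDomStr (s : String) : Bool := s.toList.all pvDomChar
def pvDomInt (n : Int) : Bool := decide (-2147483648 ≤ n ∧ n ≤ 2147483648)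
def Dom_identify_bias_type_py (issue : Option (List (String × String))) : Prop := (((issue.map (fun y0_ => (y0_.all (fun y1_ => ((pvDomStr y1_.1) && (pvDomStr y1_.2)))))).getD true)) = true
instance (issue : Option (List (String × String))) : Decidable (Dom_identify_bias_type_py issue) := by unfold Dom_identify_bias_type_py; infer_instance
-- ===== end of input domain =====

-- ===== PORT A =====
-- B replaces the if-elif branch chain by a min-rank accumulator over a flat term→rank map plus a name table (objective: alternative); return values proved equal.
def identify_bias_type_py (issue : Option (List (String × String))) : String :=
  match issue with
  | none => "general_bias"
  | some d =>
    if d.isEmpty then "general_bias"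
    else
      let rule_id := PySem.Str.lower (PySem.Dict.getD (PySem.Dict.ofList d) "rule_id" "")
      let description := PySem.Str.lower (PySem.Dict.getD (PySem.Dict.ofList d) "description" "")
      if ["gender", "sexist", "sexism", "man", "woman", "male", "female"].any
          (fun term => PySem.Str.isIn term rule_id || PySem.Str.isIn term description) then "gender_bias"
      else if ["race", "racial", "ethnic", "racism"].any
          (fun term => PySem.Str.isIn term rule_id || PySem.Str.isIn term description) then "racial_bias"
      else if ["age", "ageism", "elderly", "young", "old"].any
          (fun term => PySem.Str.isIn term rule_id || PySem.Str.isIn term description) then "age_bias"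
      else if ["disab", "handicap", "impair"].any
          (fun term => PySem.Str.isIn term rule_id || PySem.Str.isIn term description) then "disability_bias"
      else if ["cultur", "religious", "nationality"].any
          (fun term => PySem.Str.isIn term rule_id || PySem.Str.isIn term description) then "cultural_bias"
      else "general_bias"

-- ===== PORT B =====
-- flat term → priority-rank map (Source B's _TERM_RANK, in its insertion order)
def pvTermRank : List (String × Nat) :=
  [("gender", 0), ("sexist", 0), ("sexism", 0), ("man", 0), ("woman", 0), ("male", 0), ("female", 0),
   ("race", 1), ("racial", 1), ("ethnic", 1), ("racism", 1),
   ("age", 2), ("ageism", 2), ("elderly", 2), ("young", 2), ("old", 2),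
   ("disab", 3), ("handicap", 3), ("impair", 3),
   ("cultur", 4), ("religious", 4), ("nationality", 4)]

def pvNames : List String :=
  ["gender_bias", "racial_bias", "age_bias", "disability_bias", "cultural_bias", "general_bias"]

def identify_bias_type_py_alt (issue : Option (List (String × String))) : String :=
  match issue with
  | none => "general_bias"
  | some d =>
    if d.isEmpty then "general_bias"
    else
      let rule_id := PySem.Str.lower (PySem.Dict.getD (PySem.Dict.ofList d) "rule_id" "")
      let description := PySem.Str.lower (PySem.Dict.getD (PySem.Dict.ofList d) "description" "")
      let best := pvTermRank.foldl
        (fun best p =>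
          if p.2 < best ∧ (PySem.Str.isIn p.1 rule_id || PySem.Str.isIn p.1 description) = true
          then p.2 else best) 5
      pvNames.getD best "general_bias"

-- ===== PRECONDITION & SPEC =====
def Spec_identify_bias_type_py (issue : Option (List (String × String))) (out : String) : Prop := out = identify_bias_type_py_alt issue
instance (issue : Option (List (String × String))) (out : String) : Decidable (Spec_identify_bias_type_py issue out) := by unfold Spec_identify_bias_type_py; infer_instance

-- ===== CLAIM (what is proved, stated in full; the proofs are below) =====
def Claim_equal_identify_bias_type_py : Prop := ∀ (issue : Option (List (String × String))), Dom_identify_bias_type_py issue → Spec_identify_bias_type_py issue (identify_bias_type_py issue)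

-- ===== LEMMAS AND PROOFS =====

-- Folding one rank-k group of terms keeps the accumulator unless k improves it and some term matches.
theorem pv_foldl_group (r s : String) (k b : Nat) (ts : List String) :
    List.foldl (fun best p =>
        if p.2 < best ∧ (PySem.Str.isIn p.1 r || PySem.Str.isIn p.1 s) = true
        then p.2 else best) b
      (ts.map (fun t => (t, k)))
      = if k < b ∧ ts.any (fun t => PySem.Str.isIn t r || PySem.Str.isIn t s) = true then k else b := by
  induction ts generalizing b with
  | nil => simp
  | cons t ts ih =>
    simp only [List.map_cons, List.foldl_cons]
    rw [ih]
    simp only [List.any_cons, Bool.or_eq_true]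
    split_ifs <;> first | rfl | tauto

theorem pvTermRank_grouped :
    pvTermRank =
      (["gender", "sexist", "sexism", "man", "woman", "male", "female"].map (fun t => (t, 0)))
      ++ (["race", "racial", "ethnic", "racism"].map (fun t => (t, 1)))
      ++ (["age", "ageism", "elderly", "young", "old"].map (fun t => (t, 2)))
      ++ (["disab", "handicap", "impair"].map (fun t => (t, 3)))
      ++ (["cultur", "religious", "nationality"].map (fun t => (t, 4))) := by
  rfl

-- The min-rank fold + name lookup equals A's branch chain, for any pair of texts.
theorem pv_core (r s : String) :
    (if ["gender", "sexist", "sexism", "man", "woman", "male", "female"].any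
          (fun term => PySem.Str.isIn term r || PySem.Str.isIn term s) then "gender_bias"
      else if ["race", "racial", "ethnic", "racism"].any
          (fun term => PySem.Str.isIn term r || PySem.Str.isIn term s) then "racial_bias"
      else if ["age", "ageism", "elderly", "young", "old"].any
          (fun term => PySem.Str.isIn term r || PySem.Str.isIn term s) then "age_bias"
      else if ["disab", "handicap", "impair"].any
          (fun term => PySem.Str.isIn term r || PySem.Str.isIn term s) then "disability_bias"
      else if ["cultur", "religious", "nationality"].any
          (fun term => PySem.Str.isIn term r || PySem.Str.isIn term s) then "cultural_bias"
      else "general_bias")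
      = pvNames.getD
          (pvTermRank.foldl
            (fun best p =>
              if p.2 < best ∧ (PySem.Str.isIn p.1 r || PySem.Str.isIn p.1 s) = true
              then p.2 else best) 5) "general_bias" := by
  rw [pvTermRank_grouped]
  rw [List.foldl_append, List.foldl_append, List.foldl_append, List.foldl_append]
  rw [pv_foldl_group, pv_foldl_group, pv_foldl_group, pv_foldl_group, pv_foldl_group]
  generalize (List.any ["gender", "sexist", "sexism", "man", "woman", "male", "female"]
    fun term => PySem.Str.isIn term r || PySem.Str.isIn term s) = c0
  generalize (List.any ["race", "racial", "ethnic", "racism"]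
    fun term => PySem.Str.isIn term r || PySem.Str.isIn term s) = c1
  generalize (List.any ["age", "ageism", "elderly", "young", "old"]
    fun term => PySem.Str.isIn term r || PySem.Str.isIn term s) = c2
  generalize (List.any ["disab", "handicap", "impair"]
    fun term => PySem.Str.isIn term r || PySem.Str.isIn term s) = c3
  generalize (List.any ["cultur", "religious", "nationality"]
    fun term => PySem.Str.isIn term r || PySem.Str.isIn term s) = c4
  revert c0 c1 c2 c3 c4
  decide

-- ===== VERDICT (by name: the statement is the Claim_ definition above) =====
theorem identify_bias_type_py_spec : Claim_equal_identify_bias_type_py := by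
  intro issue _
  unfold Spec_identify_bias_type_py identify_bias_type_py identify_bias_type_py_alt
  cases issue with
  | none => rfl
  | some d =>
    by_cases hd : d.isEmpty
    · simp [hd]
    · simp only [hd]
      exact pv_core _ _
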